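-- pv_equiv track=rewrite | github.com/dimagi/rad-outlier-detect | outlier_detect.py | _sum_frequencies
-- ===== SOURCE A (Python) =====
-- def _sum_frequencies(agg_unit, frequencies):
--     """Sums frequencies for each aggregation unit except the given one.
--
--     Args:
--         agg_unit: the aggregation unit of concern.
--         frequencies: dictionary of dictionaries, mapping (aggregation unit) -> (value) ->
--             (number of times aggregation unit reported value).
--
--     Returns:
--         a dictionary mapping (value) -> (number of times all aggregation units apart from
--         agg_unit reported this value)
--     """
--     # Get the range from the frequencies dictionary.  Assumes that the range is the same
--     # for each aggregation unit in this distribution.  Bad things may happen if this is not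
--     # the case.
--     rng = frequencies[agg_unit].keys()
--     all_frequencies = {}
--     for r in rng:
--         all_frequencies[r] = 0
--     for other_agg_unit in list(frequencies.keys()):
--         if other_agg_unit == agg_unit:
--             continue
--         for r in rng:
--             all_frequencies[r] += frequencies[other_agg_unit][r]
--     return all_frequencies
-- ===== SOURCE B (Python) =====
-- def _sum_frequencies(agg_unit, frequencies):
--     """Total-minus-one: sum each value's frequency over ALL aggregation units,
--     then subtract the excluded unit's own counts."""
--     rng = frequencies[agg_unit].keys()
--     total = dict.fromkeys(rng, 0)
--     for freq in frequencies.values():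
--         for r in rng:
--             total[r] += freq[r]
--     own = frequencies[agg_unit]
--     return {r: total[r] - own[r] for r in rng}
-- ===== Notes on version B (the rewrite author's own statement) =====
-- stated objective: alternative
-- what changed: B computes a grand total of each value's frequency over ALL aggregation units in one pass and then subtracts the excluded unit's own counts, instead of A's zero-initialised sum that skips the excluded unit inside the loop.
import Mathlib
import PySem

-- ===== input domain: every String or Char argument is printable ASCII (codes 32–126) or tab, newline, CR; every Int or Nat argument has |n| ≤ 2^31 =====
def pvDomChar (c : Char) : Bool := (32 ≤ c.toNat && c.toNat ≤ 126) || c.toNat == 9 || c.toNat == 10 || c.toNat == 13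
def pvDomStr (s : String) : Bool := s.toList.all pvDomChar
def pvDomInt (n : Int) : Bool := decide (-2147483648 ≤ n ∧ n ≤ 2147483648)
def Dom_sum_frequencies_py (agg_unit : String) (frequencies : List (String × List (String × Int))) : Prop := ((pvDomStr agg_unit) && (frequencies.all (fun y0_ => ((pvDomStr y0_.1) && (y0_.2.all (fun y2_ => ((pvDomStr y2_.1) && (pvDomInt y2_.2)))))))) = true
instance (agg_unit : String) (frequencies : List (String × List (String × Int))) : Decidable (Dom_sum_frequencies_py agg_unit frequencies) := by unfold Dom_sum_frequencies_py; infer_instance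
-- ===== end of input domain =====

-- B sums each value's frequency over ALL aggregation units in one pass and subtracts the
-- excluded unit's own counts (total-minus-one), instead of A's skip-one summation; alternative, same cost.


-- ===== PORT A =====
def sum_frequencies_py (agg_unit : String) (frequencies : List (String × List (String × Int))) : List (String × Int) :=
  let freq : PySem.Dict String (List (String × Int)) := PySem.Dict.mk frequencies
  -- rng = frequencies[agg_unit].keys()  (KeyError excluded by Pre_)
  let rng : List String := (PySem.Dict.mk (freq.getD agg_unit [])).keys
  -- all_frequencies = {}; for r in rng: all_frequencies[r] = 0
  let init : PySem.Dict String Int := rng.foldl (fun d r => d.insert r 0) PySem.Dict.empty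
  -- for other_agg_unit in list(frequencies.keys()): if == agg_unit: continue; for r in rng: all_frequencies[r] += frequencies[other_agg_unit][r]
  let final : PySem.Dict String Int := freq.keys.foldl (fun d u =>
      if u == agg_unit then d
      else rng.foldl (fun d r => d.modify r 0 (fun v => v + (PySem.Dict.mk (freq.getD u [])).getD r 0)) d) init
  final.items

-- ===== PORT B =====
def sum_frequencies_py_alt (agg_unit : String) (frequencies : List (String × List (String × Int))) : List (String × Int) :=
  let freq : PySem.Dict String (List (String × Int)) := PySem.Dict.mk frequencies
  let own : PySem.Dict String Int := PySem.Dict.mk (freq.getD agg_unit [])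
  let rng : List String := own.keys
  -- total = dict.fromkeys(rng, 0); for f in frequencies.values(): for r in rng: total[r] += f[r]
  let total : PySem.Dict String Int := freq.values.foldl (fun t f =>
      rng.foldl (fun t r => t.modify r 0 (fun v => v + (PySem.Dict.mk f).getD r 0)) t)
      (rng.foldl (fun t r => t.insert r 0) PySem.Dict.empty)
  -- {r: total[r] - own[r] for r in rng}
  rng.map (fun r => (r, total.getD r 0 - own.getD r 0))

-- ===== PRECONDITION & SPEC =====
-- Pre_ excludes (a) inputs where A raises KeyError (agg_unit missing, or a value of agg_unit's range
-- missing from some other unit's dictionary) and (b) association lists with duplicate keys in the outer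
-- dict or in agg_unit's inner dict, which do not arise from Python dicts.
def Pre_sum_frequencies_py (agg_unit : String) (frequencies : List (String × List (String × Int))) : Prop :=
  agg_unit ∈ frequencies.map Prod.fst ∧
  (frequencies.map Prod.fst).Nodup ∧
  ((((PySem.Dict.mk frequencies).getD agg_unit []).map Prod.fst)).Nodup ∧
  ∀ p ∈ frequencies, ∀ r ∈ (((PySem.Dict.mk frequencies).getD agg_unit []).map Prod.fst),
    r ∈ p.2.map Prod.fst
instance (agg_unit : String) (frequencies : List (String × List (String × Int))) : Decidable (Pre_sum_frequencies_py agg_unit frequencies) := by unfold Pre_sum_frequencies_py; infer_instance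

def pvWitness_sum_frequencies_py : String × (List (String × List (String × Int))) :=
  ("a", [("a", [("x", 1), ("y", 2)]), ("b", [("x", 3), ("y", 4)])])

def Spec_sum_frequencies_py (agg_unit : String) (frequencies : List (String × List (String × Int))) (out : List (String × Int)) : Prop := out = sum_frequencies_py_alt agg_unit frequencies
instance (agg_unit : String) (frequencies : List (String × List (String × Int))) (out : List (String × Int)) : Decidable (Spec_sum_frequencies_py agg_unit frequencies out) := by unfold Spec_sum_frequencies_py; infer_instance

-- ===== CLAIM (what is proved, stated in full; the proofs are below) =====
def Claim_equal_sum_frequencies_py : Prop := ∀ (agg_unit : String) (frequencies : List (String × List (String × Int))), Dom_sum_frequencies_py agg_unit frequencies → Pre_sum_frequencies_py agg_unit frequencies → Spec_sum_frequencies_py agg_unit frequencies (sum_frequencies_py agg_unit frequencies)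

-- ===== LEMMAS AND PROOFS =====

-- inner loop 'for r in rng: d[r] += g r' : value at r and keys
theorem inner_getD (rng : List String) (g : String → Int) (d : PySem.Dict String Int)
    (r : String) (hnd : rng.Nodup) :
    (rng.foldl (fun d x => d.modify x 0 (fun v => v + g x)) d).getD r 0
      = d.getD r 0 + (if r ∈ rng then g r else 0) := by
  induction rng generalizing d with
  | nil => simp
  | cons x xs ih =>
    simp only [List.foldl_cons]
    rw [ih _ (by exact hnd.of_cons)]
    rw [PySem.Dict.getD_modify]
    by_cases hrx : r = x
    · subst hrx
      have : r ∉ xs := by simpa using (List.nodup_cons.mp hnd).1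
      simp [this]
    · simp [hrx]

theorem inner_keys (rng : List String) (g : String → Int) (d : PySem.Dict String Int)
    (hsub : ∀ x ∈ rng, x ∈ d.keys) :
    (rng.foldl (fun d x => d.modify x 0 (fun v => v + g x)) d).keys = d.keys := by
  induction rng generalizing d with
  | nil => rfl
  | cons x xs ih =>
    simp only [List.foldl_cons]
    have hc : d.contains x = true :=
      (PySem.Dict.contains_iff_mem_keys d x).mpr (hsub x (by simp))
    have hk : (d.modify x 0 (fun v => v + g x)).keys = d.keys := by
      rw [PySem.Dict.keys_modify, PySem.Dict.keys_insert_of_contains d _ hc]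
    rw [ih _ (by intro y hy; rw [hk]; exact hsub y (by simp [hy]))]
    exact hk

-- A's outer loop over the unit list
theorem outerA_getD (L : List String) (agg : String) (rng : List String)
    (g : String → String → Int) (d : PySem.Dict String Int) (r : String)
    (hr : r ∈ rng) (hnd : rng.Nodup) :
    (L.foldl (fun d u => if u == agg then d
        else rng.foldl (fun d x => d.modify x 0 (fun v => v + g u x)) d) d).getD r 0
      = d.getD r 0 + (L.map (fun u => if u = agg then 0 else g u r)).sum := by
  induction L generalizing d with
  | nil => simp
  | cons u us ih =>
    rw [List.foldl_cons, List.map_cons, List.sum_cons]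
    by_cases hu : u = agg
    · rw [if_pos (beq_iff_eq.mpr hu), ih, if_pos hu]; ring
    · rw [if_neg (fun h => hu (beq_iff_eq.mp h)), ih,
        inner_getD rng (g u) d r hnd, if_pos hr, if_neg hu]
      ring

theorem outerA_keys (L : List String) (agg : String) (rng : List String)
    (g : String → String → Int) (d : PySem.Dict String Int)
    (hsub : ∀ x ∈ rng, x ∈ d.keys) :
    (L.foldl (fun d u => if u == agg then d
        else rng.foldl (fun d x => d.modify x 0 (fun v => v + g u x)) d) d).keys = d.keys := by
  induction L generalizing d with
  | nil => rfl
  | cons u us ih =>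
    simp only [List.foldl_cons]
    by_cases hu : u == agg
    · rw [if_pos hu]; exact ih d hsub
    · rw [if_neg (by simpa using hu)]
      have hk := inner_keys rng (g u) d hsub
      rw [ih _ (by intro y hy; rw [hk]; exact hsub y hy)]
      exact hk

-- B's outer loop over the values list
theorem outerB_getD (V : List (List (String × Int))) (rng : List String)
    (t : PySem.Dict String Int) (r : String) (hr : r ∈ rng) (hnd : rng.Nodup) :
    (V.foldl (fun t f => rng.foldl (fun t x => t.modify x 0 (fun v => v + (PySem.Dict.mk f).getD x 0)) t) t).getD r 0
      = t.getD r 0 + (V.map (fun f => (PySem.Dict.mk f).getD r 0)).sum := by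
  induction V generalizing t with
  | nil => simp
  | cons f fs ih =>
    simp only [List.foldl_cons, List.map_cons, List.sum_cons]
    rw [ih _, inner_getD rng _ t r hnd]
    simp [hr]; ring

-- the zero-initialisation loop
theorem init_keys (rng : List String) :
    (rng.foldl (fun d r => d.insert r 0) (PySem.Dict.empty : PySem.Dict String Int)).keys
      = PySem.Set.ofList rng := by
  rw [PySem.Dict.keys_foldl_insert]
  simp [PySem.Set.update_nil_left]

theorem init_getD (rng : List String) (r : String) :
    (rng.foldl (fun d r => d.insert r 0) (PySem.Dict.empty : PySem.Dict String Int)).getD r 0 = 0 := by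
  induction rng using List.reverseRecOn with
  | nil => simp
  | append_singleton xs x ih =>
    rw [List.foldl_append]
    simp only [List.foldl_cons, List.foldl_nil]
    rw [PySem.Dict.getD_insert]
    split_ifs <;> simp [ih]

-- looking up each entry's own key gives its own value (outer Nodup)
theorem getD_fst_eq_snd (l : List (String × List (String × Int)))
    (hnd : (l.map Prod.fst).Nodup) (p : String × List (String × Int)) (hp : p ∈ l) :
    (PySem.Dict.mk l).getD p.1 [] = p.2 := by
  apply PySem.Dict.getD_of_mem_items (d := PySem.Dict.mk l) (k := p.1) (v := p.2) hp
  simpa [PySem.Dict.keys] using hnd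

-- sum over entries skipping agg = total sum minus agg's own value
theorem sum_skip_eq_sub (l : List (String × List (String × Int))) (agg : String)
    (F : List (String × Int) → Int)
    (hmem : agg ∈ l.map Prod.fst) (hnd : (l.map Prod.fst).Nodup) :
    (l.map (fun p => if p.1 = agg then 0 else F p.2)).sum
      = (l.map (fun p => F p.2)).sum - F ((PySem.Dict.mk l).getD agg []) := by
  induction l with
  | nil => simp at hmem
  | cons p ps ih =>
    obtain ⟨u, dv⟩ := p
    rw [List.map_cons] at hnd
    have hh := List.nodup_cons.mp hnd
    simp only [List.map_cons, List.sum_cons]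
    by_cases hp : u = agg
    · subst hp
      have hagg : u ∉ ps.map Prod.fst := hh.1
      have hrest : (ps.map (fun q => if q.1 = u then 0 else F q.2)).sum
          = (ps.map (fun q => F q.2)).sum := by
        congr 1
        apply List.map_congr_left
        intro q hq
        have hq1 : q.1 ≠ u := fun h => hagg (h ▸ List.mem_map_of_mem hq)
        simp [hq1]
      have hlook : (PySem.Dict.mk ((u, dv) :: ps)).getD u [] = dv := by
        simp [PySem.Dict.getD_eq_get?_getD, PySem.Dict.get?_mk_cons]
      simp [hlook]
      exact hrest
    · have hmem' : agg ∈ ps.map Prod.fst := by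
        simp only [List.map_cons, List.mem_cons] at hmem
        exact hmem.resolve_left (fun h => hp h.symm)
      have hlook : (PySem.Dict.mk ((u, dv) :: ps)).getD agg []
          = (PySem.Dict.mk ps).getD agg [] := by
        simp [PySem.Dict.getD_eq_get?_getD, PySem.Dict.get?_mk_cons,
          show (u == agg) = false by simpa using hp]
      rw [if_neg hp, ih hmem' hh.2, hlook]
      ring

-- ===== VERDICT (by name: the statement is the Claim_ definition above) =====
theorem sum_frequencies_py_spec : Claim_equal_sum_frequencies_py := by
  intro agg freqs _ hpre
  obtain ⟨hmem, hndU, hndR, _⟩ := hpre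
  unfold Spec_sum_frequencies_py sum_frequencies_py sum_frequencies_py_alt
  simp only []
  set rng : List String := (PySem.Dict.mk ((PySem.Dict.mk freqs).getD agg [])).keys with hrng
  have hndR' : rng.Nodup := by simpa [hrng, PySem.Dict.keys] using hndR
  set init : PySem.Dict String Int := rng.foldl (fun d r => d.insert r 0) PySem.Dict.empty with hinit
  have hik : init.keys = rng := by
    rw [hinit, init_keys]
    exact PySem.Set.ofList_eq_self_of_nodup rng hndR'
  have hsub : ∀ x ∈ rng, x ∈ init.keys := by intro x hx; rw [hik]; exact hx
  set g : String → String → Int :=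
    fun u r => (PySem.Dict.mk ((PySem.Dict.mk freqs).getD u [])).getD r 0 with hg
  set final : PySem.Dict String Int := (PySem.Dict.mk freqs).keys.foldl (fun d u =>
      if u == agg then d
      else rng.foldl (fun d r => d.modify r 0 (fun v => v + g u r)) d) init with hfinal
  have hfk : final.keys = rng := by rw [hfinal, outerA_keys _ _ _ _ _ hsub, hik]
  have hitems : final.items = final.keys.map (fun k => (k, final.getD k 0)) :=
    PySem.Dict.items_eq_map_keys final (by rw [hfk]; exact hndR') 0
  rw [hitems, hfk]
  apply List.map_congr_left
  intro r hr
  refine Prod.ext rfl ?_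
  show final.getD r 0 = _
  rw [hfinal, outerA_getD _ _ _ _ _ _ hr hndR', hinit, init_getD]
  rw [outerB_getD _ _ _ _ hr hndR', init_getD]
  -- keys side : sum over keys = sum over entries (Nodup)
  have hkeys_map : ((PySem.Dict.mk freqs).keys.map (fun u => if u = agg then 0 else g u r))
      = freqs.map (fun p => if p.1 = agg then 0 else (PySem.Dict.mk p.2).getD r 0) := by
    show (freqs.map Prod.fst).map _ = _
    rw [List.map_map]
    apply List.map_congr_left
    intro p hp
    simp only [Function.comp]
    by_cases hp1 : p.1 = agg
    · simp [hp1]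
    · rw [if_neg hp1, if_neg hp1]
      show (PySem.Dict.mk ((PySem.Dict.mk freqs).getD p.1 [])).getD r 0 = _
      rw [getD_fst_eq_snd freqs hndU p hp]
  have hvals_map : ((PySem.Dict.mk freqs).values.map (fun f => (PySem.Dict.mk f).getD r 0))
      = freqs.map (fun p => (PySem.Dict.mk p.2).getD r 0) := by
    show (freqs.map Prod.snd).map _ = _
    rw [List.map_map]; rfl
  rw [hkeys_map, hvals_map,
    sum_skip_eq_sub freqs agg (fun f => (PySem.Dict.mk f).getD r 0) hmem hndU]
  ring
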